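-- pv_equiv track=rewrite | github.com/narnolddd/adventOfCode | 2019/Day22/day22Naomi.py | evaluate
-- ===== SOURCE A (Python) =====
-- def to_binary(x):
--     return bin(x)[2:]
--
-- def evaluate(fun, size, index):
--     val = 0
--     x = to_binary(abs(fun[0]))
--     sums = []
--     a = index
--     for _ in range(len(x)):
--         sums.append(a)
--         new_index = a*2 % size
--         a = new_index
--     for k in range(len(x)):
--         if x[k]=="1":
--             val = (val + sums[len(x)-1-k])%size
--     if fun[0]<0:
--         val = (size - val)%size
--     val = (val + fun[1])%size
--     return val
-- ===== SOURCE B (Python) =====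
-- def evaluate(fun, size, index):
--     # closed form: Python's % already reduces exactly like A's step-by-step double-and-add
--     return (fun[0] * index + fun[1]) % size
-- ===== Notes on version B (the rewrite author's own statement) =====
-- stated objective: simpler
-- what changed: Replaced the binary-string double-and-add loop (bin(abs(fun[0])), a doublings table and a sign-complement branch) by the single closed-form expression (fun[0]*index + fun[1]) % size.
import Mathlib
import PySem

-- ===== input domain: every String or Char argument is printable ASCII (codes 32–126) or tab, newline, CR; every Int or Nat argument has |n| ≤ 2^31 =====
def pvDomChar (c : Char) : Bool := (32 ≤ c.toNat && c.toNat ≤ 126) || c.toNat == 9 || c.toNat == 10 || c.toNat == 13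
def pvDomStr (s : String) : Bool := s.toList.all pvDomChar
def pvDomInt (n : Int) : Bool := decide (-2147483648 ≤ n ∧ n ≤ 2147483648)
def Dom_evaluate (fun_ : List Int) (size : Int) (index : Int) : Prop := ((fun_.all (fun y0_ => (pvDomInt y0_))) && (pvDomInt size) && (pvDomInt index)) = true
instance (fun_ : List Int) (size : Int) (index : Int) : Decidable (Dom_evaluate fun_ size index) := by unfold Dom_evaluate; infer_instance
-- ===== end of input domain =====

-- ===== PORT A =====
-- B changes: closed-form (fun[0]*index+fun[1]) % size instead of A's binary double-and-add loop (simpler).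
-- helper: bin(n)[2:] for n > 0 (MSB-first binary digits)
def binCore : Nat → List Char
  | 0 => []
  | (n+1) => binCore ((n+1) / 2) ++ [if (n+1) % 2 = 1 then '1' else '0']
decreasing_by exact Nat.div_lt_self (Nat.succ_pos n) (by norm_num)

-- bin(x)[2:] for x ≥ 0 (A only calls it on abs(fun[0]))
def to_binary (x : Int) : List Char := if x = 0 then ['0'] else binCore x.toNat

def evaluate (fun_ : List Int) (size : Int) (index : Int) : Int :=
  let f0 : Int := (PySem.List.pyGet? fun_ 0).getD 0
  let x : List Char := to_binary |f0|
  -- first loop: build sums and thread a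
  let sa : List Int × Int :=
    (List.range x.length).foldl
      (fun (p : List Int × Int) _ => (p.1 ++ [p.2], PySem.Int.mod (p.2 * 2) size))
      ([], index)
  let sums : List Int := sa.1
  -- second loop: add sums[len(x)-1-k] for each set bit
  let val : Int :=
    (List.range x.length).foldl
      (fun val k =>
        if x.getD k ' ' = '1' then PySem.Int.mod (val + sums.getD (x.length - 1 - k) 0) size
        else val)
      0
  let val : Int := if f0 < 0 then PySem.Int.mod (size - val) size else val
  PySem.Int.mod (val + (PySem.List.pyGet? fun_ 1).getD 0) size

-- ===== PORT B =====
def evaluate_alt (fun_ : List Int) (size : Int) (index : Int) : Int :=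
  PySem.Int.mod ((PySem.List.pyGet? fun_ 0).getD 0 * index + (PySem.List.pyGet? fun_ 1).getD 0) size

-- ===== PRECONDITION & SPEC =====
-- Pre_ excludes exactly the inputs where Python A raises: lists shorter than 2 (IndexError)
-- and size = 0 (ZeroDivisionError in the doubling loop).
def Pre_evaluate (fun_ : List Int) (size : Int) (index : Int) : Prop :=
  2 ≤ fun_.length ∧ size ≠ 0

instance (fun_ : List Int) (size : Int) (index : Int) : Decidable (Pre_evaluate fun_ size index) := by
  unfold Pre_evaluate; infer_instance

def pvWitness_evaluate : List Int × Int × Int := ([3, 1], 7, 2)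

def Spec_evaluate (fun_ : List Int) (size : Int) (index : Int) (out : Int) : Prop := out = evaluate_alt fun_ size index
instance (fun_ : List Int) (size : Int) (index : Int) (out : Int) : Decidable (Spec_evaluate fun_ size index out) := by unfold Spec_evaluate; infer_instance

-- ===== CLAIM (what is proved, stated in full; the proofs are below) =====
def Claim_equal_evaluate : Prop := ∀ (fun_ : List Int) (size : Int) (index : Int), Dom_evaluate fun_ size index → Pre_evaluate fun_ size index → Spec_evaluate fun_ size index (evaluate fun_ size index)

-- ===== LEMMAS AND PROOFS =====

-- numeric value of an MSB-first binary digit string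
def charsVal (l : List Char) : Nat :=
  l.foldl (fun acc c => 2 * acc + (if c = '1' then 1 else 0)) 0

theorem charsVal_append_one (l : List Char) (c : Char) :
    charsVal (l ++ [c]) = 2 * charsVal l + (if c = '1' then 1 else 0) := by
  simp [charsVal, List.foldl_append]

theorem binCore_val : ∀ n : Nat, charsVal (binCore n) = n := by
  intro n
  induction n using Nat.strong_induction_on with
  | _ n ih =>
    match n with
    | 0 => simp [binCore, charsVal]
    | (m+1) =>
      rw [binCore, charsVal_append_one, ih ((m+1)/2) (Nat.div_lt_self (Nat.succ_pos m) (by norm_num))]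
      rcases Nat.mod_two_eq_zero_or_one (m+1) with h | h <;> simp [h] <;> omega

theorem to_binary_val (n : Nat) : charsVal (to_binary (n : Int)) = n := by
  rcases Nat.eq_zero_or_pos n with h | h
  · subst h; simp [to_binary, charsVal]
  · rw [to_binary, if_neg (by exact_mod_cast Nat.pos_iff_ne_zero.mp h), Int.toNat_natCast, binCore_val]

theorem fmod_modeq (a s : Int) : a.fmod s ≡ a [ZMOD s] := by
  rw [Int.modEq_iff_dvd]
  have := Int.fmod_def a s
  exact ⟨a.fdiv s, by omega⟩

theorem fmod_congr {s a b : Int} (h : a ≡ b [ZMOD s]) : a.fmod s = b.fmod s := by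
  rw [Int.fmod_eq_fmod_iff_fmod_sub_eq_zero]
  have hd : s ∣ a - b := (Int.modEq_iff_dvd.mp h.symm)
  exact Int.fmod_eq_zero_of_dvd hd

-- the iterates a, a*2%size, (a*2%size)*2%size, … of A's first loop
def gSeq (size index : Int) : Nat → Int
  | 0 => index
  | (i+1) => (gSeq size index i * 2).fmod size

theorem gSeq_modeq (size index : Int) (i : Nat) :
    gSeq size index i ≡ index * 2 ^ i [ZMOD size] := by
  induction i with
  | zero => simp [gSeq]
  | succ i ih =>
    calc gSeq size index (i+1) = (gSeq size index i * 2).fmod size := rfl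
      _ ≡ gSeq size index i * 2 [ZMOD size] := fmod_modeq _ _
      _ ≡ (index * 2 ^ i) * 2 [ZMOD size] := ih.mul_right 2
      _ = index * 2 ^ (i+1) := by ring

theorem sums_spec (size index : Int) (L : Nat) :
    (List.range L).foldl
      (fun (p : List Int × Int) _ => (p.1 ++ [p.2], PySem.Int.mod (p.2 * 2) size))
      ([], index)
    = ((List.range L).map (gSeq size index), gSeq size index L) := by
  induction L with
  | zero => simp [gSeq]
  | succ L ih =>
    rw [List.range_succ, List.foldl_append, ih]
    simp [PySem.Int.mod, gSeq]

theorem sums_getD (size index : Int) (L i : Nat) (hi : i < L) :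
    (((List.range L).map (gSeq size index)).getD i 0) = gSeq size index i := by
  rw [List.getD_eq_getElem?_getD]
  simp [List.getElem?_map, List.getElem?_range hi]

theorem val_modeq (size index : Int) (x : List Char) :
    ∀ j, j ≤ x.length →
    (List.range j).foldl
      (fun val k =>
        if x.getD k ' ' = '1' then
          PySem.Int.mod (val + ((List.range x.length).map (gSeq size index)).getD (x.length - 1 - k) 0) size
        else val) 0
    ≡ index * (charsVal (x.take j) : Int) * 2 ^ (x.length - j) [ZMOD size] := by
  intro j hj
  induction j with
  | zero => simp [charsVal]
  | succ j ih =>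
    have hjL : j < x.length := hj
    have ih' := ih (Nat.le_of_lt hjL)
    rw [List.range_succ, List.foldl_append]
    have htake : x.take (j+1) = x.take j ++ [x.getD j ' '] := by
      rw [List.take_add_one, List.getElem?_eq_getElem hjL]
      simp [List.getD_eq_getElem?_getD, List.getElem?_eq_getElem hjL]
    have hpow : (2 : Int) ^ (x.length - j) = 2 ^ (x.length - 1 - j) * 2 := by
      rw [← pow_succ]
      congr 1
      omega
    rw [htake, charsVal_append_one]
    simp only [List.foldl_cons, List.foldl_nil, List.getD_eq_getElem?_getD]
    by_cases hb : x[j]?.getD ' ' = '1'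
    · rw [if_pos hb, if_pos hb,
        show (((List.range x.length).map (gSeq size index))[x.length - 1 - j]?.getD 0)
          = gSeq size index (x.length - 1 - j) from by
            rw [← List.getD_eq_getElem?_getD]; exact sums_getD size index _ _ (by omega)]
      calc PySem.Int.mod ((List.range j).foldl _ 0 + gSeq size index (x.length - 1 - j)) size
          ≡ (List.range j).foldl _ 0 + gSeq size index (x.length - 1 - j) [ZMOD size] :=
            fmod_modeq _ _
        _ ≡ index * (charsVal (x.take j) : Int) * 2 ^ (x.length - j)
              + index * 2 ^ (x.length - 1 - j) [ZMOD size] :=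
            ih'.add (gSeq_modeq size index _)
        _ = index * ((2 * charsVal (x.take j) + 1 : Nat) : Int) * 2 ^ (x.length - (j+1)) := by
            have h1 : x.length - (j+1) = x.length - 1 - j := by omega
            rw [h1, hpow]
            push_cast
            ring
    · rw [if_neg hb, if_neg hb]
      calc (List.range j).foldl _ 0
          ≡ index * (charsVal (x.take j) : Int) * 2 ^ (x.length - j) [ZMOD size] := ih'
        _ = index * ((2 * charsVal (x.take j) + 0 : Nat) : Int) * 2 ^ (x.length - (j+1)) := by
            have h1 : x.length - j = (x.length - (j+1)) + 1 := by omega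
            rw [h1, pow_succ]
            push_cast
            ring

-- ===== VERDICT (by name: the statement is the Claim_ definition above) =====
theorem evaluate_spec : Claim_equal_evaluate := by
  intro fun_ size index _ _
  simp only [Spec_evaluate, evaluate, evaluate_alt]
  set f0 : Int := (PySem.List.pyGet? fun_ 0).getD 0 with hf0
  set f1 : Int := (PySem.List.pyGet? fun_ 1).getD 0 with hf1
  set x : List Char := to_binary |f0| with hx
  rw [sums_spec size index x.length]
  dsimp only
  have hval := val_modeq size index x x.length (le_refl _)
  rw [List.take_length] at hval
  have hcv : (charsVal x : Int) = |f0| := by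
    have h := to_binary_val |f0|.toNat
    rw [Int.toNat_of_nonneg (abs_nonneg f0)] at h
    rw [← hx] at h
    rw [h, Int.toNat_of_nonneg (abs_nonneg f0)]
  rw [hcv, Nat.sub_self, pow_zero, mul_one] at hval
  set v : Int := (List.range x.length).foldl
      (fun val k =>
        if x.getD k ' ' = '1' then
          PySem.Int.mod (val + ((List.range x.length).map (gSeq size index)).getD (x.length - 1 - k) 0) size
        else val) 0 with hv
  apply fmod_congr
  by_cases hneg : f0 < 0
  · rw [if_pos hneg]
    have hsz : size ≡ 0 [ZMOD size] := Int.modEq_zero_iff_dvd.mpr dvd_rfl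
    have habs : |f0| = -f0 := abs_of_neg hneg
    have h2 : PySem.Int.mod (size - v) size ≡ f0 * index [ZMOD size] := by
      calc PySem.Int.mod (size - v) size ≡ size - v [ZMOD size] := fmod_modeq _ _
        _ ≡ 0 - index * |f0| [ZMOD size] := hsz.sub hval
        _ = f0 * index := by rw [habs]; ring
    exact h2.add_right f1
  · rw [if_neg hneg]
    have habs : |f0| = f0 := abs_of_nonneg (not_lt.mp hneg)
    have h2 : v ≡ f0 * index [ZMOD size] := by
      calc v ≡ index * |f0| [ZMOD size] := hval
        _ = f0 * index := by rw [habs]; ring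
    exact h2.add_right f1
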